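-- pv_equiv track=rewrite | github.com/allenai/allennlp | allennlp/predictors/open_information_extraction.py | merge_overlapping_predictions
-- ===== SOURCE A (Python) =====
-- from typing import List, Dict
--
-- def get_coherent_next_tag(prev_label: str, cur_label: str) -> str:
--     """
--     Generate a coherent tag, given previous tag and current label.
--     """
--     if cur_label == "O":
--         # Don't need to add prefix to an "O" label
--         return "O"
--
--     if prev_label == cur_label:
--         return f"I-{cur_label}"
--     else:
--         return f"B-{cur_label}"
--
-- def merge_overlapping_predictions(tags1: List[str], tags2: List[str]) -> List[str]:
--     """
--     Merge two predictions into one. Assumes the predicate in tags1 overlap with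
--     the predicate of tags2.
--     """
--     ret_sequence = []
--     prev_label = "O"
--
--     # Build a coherent sequence out of two
--     # spans which predicates' overlap
--
--     for tag1, tag2 in zip(tags1, tags2):
--         label1 = tag1.split("-", 1)[-1]
--         label2 = tag2.split("-", 1)[-1]
--         if (label1 == "V") or (label2 == "V"):
--             # Construct maximal predicate length -
--             # add predicate tag if any of the sequence predict it
--             cur_label = "V"
--
--         # Else - prefer an argument over 'O' label
--         elif label1 != "O":
--             cur_label = label1
--         else:
--             cur_label = label2
--
--         # Append cur tag to the returned sequence
--         cur_tag = get_coherent_next_tag(prev_label, cur_label)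
--         prev_label = cur_label
--         ret_sequence.append(cur_tag)
--     return ret_sequence
-- ===== SOURCE B (Python) =====
-- def merge_overlapping_predictions(tags1, tags2):
--     """Two passes: first select a merged label per position, then make the
--     sequence BIO-coherent in a second walk."""
--     merged = []
--     for tag1, tag2 in zip(tags1, tags2):
--         l1 = tag1.split("-", 1)[-1]
--         l2 = tag2.split("-", 1)[-1]
--         merged.append("V" if l1 == "V" or l2 == "V" else (l1 if l1 != "O" else l2))
--     out = []
--     prev = "O"
--     for label in merged:
--         if label == "O":
--             out.append("O")
--         elif label == prev:
--             out.append(f"I-{label}")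
--         else:
--             out.append(f"B-{label}")
--         prev = label
--     return out
-- ===== Notes on version B (the rewrite author's own statement) =====
-- stated objective: alternative
-- what changed: Replaces A's single fused loop (label selection + coherent-tag emission interleaved, via a helper) with two separate passes: a first pass building an intermediate merged-label list, and a second walk that turns it into BIO-coherent tags.
import Mathlib
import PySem

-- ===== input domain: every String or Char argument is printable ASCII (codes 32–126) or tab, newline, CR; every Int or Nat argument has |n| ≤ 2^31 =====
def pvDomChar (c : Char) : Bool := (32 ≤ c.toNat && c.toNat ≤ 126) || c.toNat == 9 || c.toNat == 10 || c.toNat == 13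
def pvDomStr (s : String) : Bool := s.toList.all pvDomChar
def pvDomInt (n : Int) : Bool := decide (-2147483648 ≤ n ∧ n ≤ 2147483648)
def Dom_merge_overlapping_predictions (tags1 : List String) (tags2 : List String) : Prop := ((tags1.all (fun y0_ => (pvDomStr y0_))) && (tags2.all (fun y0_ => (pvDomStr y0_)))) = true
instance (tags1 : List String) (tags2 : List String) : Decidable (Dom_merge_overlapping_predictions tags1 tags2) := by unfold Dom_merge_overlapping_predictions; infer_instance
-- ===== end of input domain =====

-- B changes the decomposition only (two separate passes instead of one fused loop); same cost.

-- ===== PORT A =====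
-- tag.split("-", 1)[-1]  (split? with a nonempty separator always returns a nonempty list,
-- so the getD defaults are never hit; exact on every input)
def pvLabelOf (tag : String) : String :=
  (PySem.List.pyGet? ((PySem.Str.splitMax? tag "-" 1).getD []) (-1)).getD ""

def get_coherent_next_tag (prev_label : String) (cur_label : String) : String :=
  if cur_label = "O" then "O"
  else if prev_label = cur_label then "I-" ++ cur_label
  else "B-" ++ cur_label

-- the body of A's loop, one iteration over the state (prev_label, ret_sequence)
def pvStepA (st : String × List String) (p : String × String) : String × List String :=
  let label1 := pvLabelOf p.1
  let label2 := pvLabelOf p.2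
  let cur_label :=
    if label1 = "V" ∨ label2 = "V" then "V"
    else if label1 ≠ "O" then label1
    else label2
  let cur_tag := get_coherent_next_tag st.1 cur_label
  (cur_label, st.2 ++ [cur_tag])

def merge_overlapping_predictions (tags1 : List String) (tags2 : List String) : List String :=
  (List.foldl pvStepA ("O", []) (tags1.zip tags2)).2

-- ===== PORT B =====
-- second pass of Source B: walk the merged-label list with the previous label as state
def pvBioize (prev : String) : List String → List String
  | [] => []
  | l :: ls =>
    (if l = "O" then "O"
     else if l = prev then "I-" ++ l
     else "B-" ++ l) :: pvBioize l ls

-- the body of Source B's first pass: the merged label for one aligned pair of tags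
def pvMergeLabel (p : String × String) : String :=
  let l1 := pvLabelOf p.1
  let l2 := pvLabelOf p.2
  if l1 = "V" ∨ l2 = "V" then "V" else if l1 ≠ "O" then l1 else l2

def merge_overlapping_predictions_alt (tags1 : List String) (tags2 : List String) : List String :=
  pvBioize "O" ((tags1.zip tags2).map pvMergeLabel)

-- ===== PRECONDITION & SPEC =====
def Spec_merge_overlapping_predictions (tags1 : List String) (tags2 : List String) (out : List String) : Prop := out = merge_overlapping_predictions_alt tags1 tags2
instance (tags1 : List String) (tags2 : List String) (out : List String) : Decidable (Spec_merge_overlapping_predictions tags1 tags2 out) := by unfold Spec_merge_overlapping_predictions; infer_instance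

-- ===== CLAIM (what is proved, stated in full; the proofs are below) =====
def Claim_equal_merge_overlapping_predictions : Prop := ∀ (tags1 : List String) (tags2 : List String), Dom_merge_overlapping_predictions tags1 tags2 → Spec_merge_overlapping_predictions tags1 tags2 (merge_overlapping_predictions tags1 tags2)

-- ===== LEMMAS AND PROOFS =====
-- A's fused loop, run from any state (prev, acc), equals acc ++ the second pass of B
-- applied to the first pass of B, started at the same prev.
theorem pvFoldl_eq_bioize (l : List (String × String)) (prev : String) (acc : List String) :
    (List.foldl pvStepA (prev, acc) l).2 = acc ++ pvBioize prev (l.map pvMergeLabel) := by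
  induction l generalizing prev acc with
  | nil => simp [pvBioize]
  | cons p ps ih =>
    rw [List.foldl_cons, List.map_cons]
    show (List.foldl pvStepA (pvStepA (prev, acc) p) ps).2 = _
    rw [show pvStepA (prev, acc) p
          = (pvMergeLabel p, acc ++ [get_coherent_next_tag prev (pvMergeLabel p)]) from rfl]
    rw [ih]
    generalize pvMergeLabel p = c
    rw [pvBioize]
    simp only [List.append_assoc, List.singleton_append]
    congr 1
    unfold get_coherent_next_tag
    by_cases h1 : c = "O"
    · simp [h1]
    · rcases eq_or_ne prev c with h2 | h2
      · simp [h1, h2]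
      · simp [h1, h2, Ne.symm h2]

-- ===== VERDICT (by name: the statement is the Claim_ definition above) =====
theorem merge_overlapping_predictions_spec : Claim_equal_merge_overlapping_predictions := by
  intro tags1 tags2 _
  unfold Spec_merge_overlapping_predictions merge_overlapping_predictions merge_overlapping_predictions_alt
  simpa using pvFoldl_eq_bioize (tags1.zip tags2) "O" []
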